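-- pv_equiv track=rewrite | github.com/soraya-rey/GENOM_kmerLearn | kmer_profiler/kmer.py | stream_aa_kmers
-- ===== SOURCE A (Python) =====
-- dico_aa = {
--     "A":0,
--     "F":1,
--     "V":2,
--     "G":3,
--     "L":4,
--     "I":5,
--     "T":6,
--     "S":7,
--     "Y":8,
--     "N":9,
--     "D":10,
--     "E":11,
--     "H":12,
--     "K":13,
--     "R":14,
--     "M":15,
--     "W":16,
--     "Q":17,
--     "C":18,
--     "P":19
-- }
--
-- def stream_aa_kmers(sequences, k):
--     x = 0
--     mask = (1<<(k*5))-1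
--     for seq in sequences:
--       for aa in range(0,len(seq)):
--           if seq[aa] not in dico_aa:
--               pass
--           else:
--               n = dico_aa[seq[aa]]&0b11111
--               x <<=5
--               x += n
--               x&=mask
--               if aa > k-2:
--                   yield x
-- ===== SOURCE B (Python) =====
-- dico_aa = {
--     "A":0, "F":1, "V":2, "G":3, "L":4, "I":5, "T":6, "S":7, "Y":8, "N":9,
--     "D":10, "E":11, "H":12, "K":13, "R":14, "M":15, "W":16, "Q":17, "C":18, "P":19
-- }
--
-- def stream_aa_kmers(sequences, k):
--     # Sliding window of the most recent k residue codes; each emission packs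
--     # the window into 5-bit slots.
--     window = []
--     for seq in sequences:
--         for i, ch in enumerate(seq):
--             code = dico_aa.get(ch)
--             if code is None:
--                 continue
--             window.append(code & 0b11111)
--             if len(window) > k:
--                 window.pop(0)
--             if i >= k - 1:
--                 val = 0
--                 for c in window:
--                     val = (val << 5) + c
--                 yield val
-- ===== Notes on version B (the rewrite author's own statement) =====
-- stated objective: alternative
-- what changed: B replaces A's masked rolling integer (shift/add/mask per residue) by a bounded sliding window of the last k residue codes, packed into 5-bit slots at each emission; Pre_ excludes k < 0, on which A raises ValueError (negative shift count).
import Mathlib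
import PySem

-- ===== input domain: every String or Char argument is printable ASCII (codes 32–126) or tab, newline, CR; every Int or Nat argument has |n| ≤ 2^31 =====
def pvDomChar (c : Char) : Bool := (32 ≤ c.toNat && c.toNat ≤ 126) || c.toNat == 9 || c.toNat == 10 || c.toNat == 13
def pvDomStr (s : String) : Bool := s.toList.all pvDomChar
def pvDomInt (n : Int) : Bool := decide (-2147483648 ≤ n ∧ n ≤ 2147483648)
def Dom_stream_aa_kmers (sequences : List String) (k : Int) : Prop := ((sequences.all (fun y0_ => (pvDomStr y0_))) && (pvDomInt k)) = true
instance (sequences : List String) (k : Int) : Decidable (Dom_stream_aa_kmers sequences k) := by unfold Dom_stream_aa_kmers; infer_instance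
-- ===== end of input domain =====

-- B keeps a bounded sliding window of the last k residue codes and packs it into
-- 5-bit slots at each emission, instead of A's masked rolling integer (objective: alternative).

-- ===== PORT A =====
def dicoAA : PySem.Dict Char Int := PySem.Dict.ofList
  [('A',0),('F',1),('V',2),('G',3),('L',4),('I',5),('T',6),('S',7),('Y',8),('N',9),
   ('D',10),('E',11),('H',12),('K',13),('R',14),('M',15),('W',16),('Q',17),('C',18),('P',19)]

-- inner 'for aa in range(0, len(seq)):' loop of A, over the rolling state (x, yielded)
def pvA_inner (k mask : Int) (seq : String) (st : Int × List Int) : Int × List Int :=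
  (PySem.List.pyRange 0 (PySem.Str.len seq) 1).foldl (fun st aa =>
    match PySem.Str.pyGet? seq aa with      -- seq[aa]; always in range here
    | none => st
    | some c =>
      match dicoAA.get? c with              -- 'not in dico_aa → pass, else n = dico_aa[...]'
      | none => st
      | some d =>
        let n := PySem.Int.band d 31
        let x := st.1 <<< (5 : Nat)
        let x := x + n
        let x := PySem.Int.band x mask
        if aa > k - 2 then (x, st.2 ++ [x]) else (x, st.2)) st

def stream_aa_kmers (sequences : List String) (k : Int) : List Int :=
  -- mask = (1 << (k*5)) - 1; '.toNat' is exact for k ≥ 0 (Pre_); Python raises ValueError for k < 0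
  let mask : Int := ((1:Int) <<< (k * 5).toNat) - 1
  (sequences.foldl (fun st seq => pvA_inner k mask seq st) (0, [])).2

-- ===== PORT B =====
-- inner 'for i, ch in enumerate(seq):' loop of B, over the state (window, yielded)
def pvB_inner (k : Int) (seq : String) (st : List Int × List Int) : List Int × List Int :=
  (PySem.List.enumerate seq.toList 0).foldl (fun st p =>
    match dicoAA.get? p.2 with              -- dico_aa.get(ch); None → continue
    | none => st
    | some code =>
      let w := st.1 ++ [PySem.Int.band code 31]                      -- window.append(code & 0b11111)
      let w := if PySem.List.len w > k then w.drop 1 else w          -- if len(window) > k: window.pop(0)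
      if p.1 ≥ k - 1 then
        (w, st.2 ++ [w.foldl (fun (v c : Int) => (v <<< (5 : Nat)) + c) 0])
      else (w, st.2)) st

def stream_aa_kmers_alt (sequences : List String) (k : Int) : List Int :=
  (sequences.foldl (fun st seq => pvB_inner k seq st) ([], [])).2

-- ===== PRECONDITION & SPEC =====
-- Pre_ excludes k < 0, on which A raises ValueError ('negative shift count') as soon as the generator runs.
def Pre_stream_aa_kmers (sequences : List String) (k : Int) : Prop := 0 ≤ k
instance (sequences : List String) (k : Int) : Decidable (Pre_stream_aa_kmers sequences k) := by unfold Pre_stream_aa_kmers; infer_instance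
def pvWitness_stream_aa_kmers : List String × Int := (["AFVx", "GL"], 2)

def Spec_stream_aa_kmers (sequences : List String) (k : Int) (out : List Int) : Prop := out = stream_aa_kmers_alt sequences k
instance (sequences : List String) (k : Int) (out : List Int) : Decidable (Spec_stream_aa_kmers sequences k out) := by unfold Spec_stream_aa_kmers; infer_instance

-- ===== CLAIM (what is proved, stated in full; the proofs are below) =====
def Claim_equal_stream_aa_kmers : Prop := ∀ (sequences : List String) (k : Int), Dom_stream_aa_kmers sequences k → Pre_stream_aa_kmers sequences k → Spec_stream_aa_kmers sequences k (stream_aa_kmers sequences k)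

-- ===== LEMMAS AND PROOFS =====

-- the value of a run of 5-bit codes, as both programs pack it (big-endian, 5 bits per code)
def pvPack (L : List Int) : Int := L.foldl (fun v c => v * 32 + c) 0

lemma pvPack_foldl (L : List Int) (a : Int) :
    L.foldl (fun v c => v * 32 + c) a = a * 32 ^ L.length + pvPack L := by
  induction L generalizing a with
  | nil => simp [pvPack]
  | cons c L ih =>
    simp only [List.foldl_cons, List.length_cons, pvPack]
    rw [ih (a * 32 + c), ih (0 * 32 + c)]
    ring

lemma pvPack_cons (c : Int) (L : List Int) :
    pvPack (c :: L) = c * 32 ^ L.length + pvPack L := by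
  simp only [pvPack, List.foldl_cons]
  rw [pvPack_foldl]
  simp only [pvPack]
  ring

lemma pvPack_bounds (L : List Int) (h : ∀ c ∈ L, 0 ≤ c ∧ c < 32) :
    0 ≤ pvPack L ∧ pvPack L < 32 ^ L.length := by
  induction L with
  | nil => simp [pvPack]
  | cons c L ih =>
    have hc := h c (by simp)
    have ih' := ih (fun x hx => h x (by simp [hx]))
    rw [pvPack_cons]
    have hp : (0:Int) < 32 ^ L.length := by positivity
    refine ⟨by nlinarith [ih'.1, hc.1], ?_⟩
    have : c * 32 ^ L.length ≤ 31 * 32 ^ L.length := by nlinarith [hc.2]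
    simp only [List.length_cons, pow_succ]
    nlinarith [ih'.2]

lemma pvPack_append (L : List Int) (d : Int) : pvPack (L ++ [d]) = pvPack L * 32 + d := by
  simp [pvPack, List.foldl_append]

lemma pvPack_mod_drop (L : List Int) (m : Nat) (h : ∀ c ∈ L, 0 ≤ c ∧ c < 32) :
    pvPack L % 32 ^ m = pvPack (L.drop (L.length - m)) := by
  induction L with
  | nil => simp [pvPack]
  | cons c L ih =>
    by_cases hlen : L.length < m
    · have h0 : (c :: L).length - m = 0 := by simp; omega
      rw [h0, List.drop_zero]
      have hb := pvPack_bounds (c :: L) h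
      exact Int.emod_eq_of_lt hb.1 (lt_of_lt_of_le hb.2 (by
        apply pow_le_pow_right₀ (by norm_num); simp; omega))
    · have hm : m ≤ L.length := by omega
      have hdrop : (c :: L).drop ((c :: L).length - m) = L.drop (L.length - m) := by
        have h1 : (c :: L).length - m = (L.length - m) + 1 := by simp; omega
        rw [h1, List.drop_succ_cons]
      rw [hdrop, ← ih (fun x hx => h x (by simp [hx])), pvPack_cons]
      have hdvd : (32:Int) ^ m ∣ c * 32 ^ L.length :=
        Dvd.dvd.mul_left (pow_dvd_pow 32 hm) c
      rw [Int.add_emod, Int.emod_eq_zero_of_dvd hdvd, zero_add, Int.emod_emod_of_dvd _ dvd_rfl]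

lemma pvBand_mask (x : Int) (m : Nat) (hx : 0 ≤ x) :
    PySem.Int.band x (32 ^ m - 1) = x % 32 ^ m := by
  have h2 : ((32:Int) ^ m - 1).toNat = 2 ^ (5 * m) - 1 := by
    have : ((32:Int) ^ m) = ((2 ^ (5 * m) : Nat) : Int) := by push_cast [pow_mul]; norm_num
    omega
  have h1 : (0:Int) < 32 ^ m := by positivity
  rw [PySem.Int.band_of_nonneg hx (by omega), h2, Nat.and_two_pow_sub_one_eq_mod]
  have hx' : x = (x.toNat : Int) := by omega
  rw [hx']
  push_cast [pow_mul]
  norm_num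

set_option maxHeartbeats 1000000 in
lemma pvDico_bounds (c : Char) (v : Int) (h : dicoAA.get? c = some v) : 0 ≤ v ∧ v < 32 := by
  have hv : v ∈ dicoAA.values := by
    have h2 := PySem.Dict.mem_items_of_get?_eq_some dicoAA h
    simp only [PySem.Dict.values]
    exact List.mem_map.mpr ⟨(c, v), h2, rfl⟩
  have hvals : dicoAA.values = [0,1,2,3,4,5,6,7,8,9,10,11,12,13,14,15,16,17,18,19] := by rfl
  rw [hvals] at hv
  simp at hv
  omega

lemma pvBand31 (d : Int) (h0 : 0 ≤ d) (h1 : d < 32) : PySem.Int.band d 31 = d := by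
  have : PySem.Int.band d ((32:Int) ^ 1 - 1) = d % 32 ^ 1 := pvBand_mask d 1 h0
  norm_num at this
  rw [this]
  exact Int.emod_eq_of_lt h0 h1

-- the relation maintained between A's state (x, out) and B's state (window, out)
def pvRel (k : Int) (sa : Int × List Int) (sb : List Int × List Int) : Prop :=
  sa.2 = sb.2 ∧ sa.1 = pvPack sb.1 ∧ (∀ c ∈ sb.1, 0 ≤ c ∧ c < 32) ∧ sb.1.length ≤ k.toNat

-- A's inner loop body, re-indexed over enumerate pairs (proved equal to pvA_inner below)
def pvA_body (k mask : Int) (st : Int × List Int) (p : Int × Char) : Int × List Int :=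
  match dicoAA.get? p.2 with
  | none => st
  | some d =>
    let x := PySem.Int.band ((st.1 <<< (5 : Nat)) + PySem.Int.band d 31) mask
    if p.1 > k - 2 then (x, st.2 ++ [x]) else (x, st.2)

-- B's inner loop body, named
def pvB_body (k : Int) (st : List Int × List Int) (p : Int × Char) : List Int × List Int :=
  match dicoAA.get? p.2 with
  | none => st
  | some code =>
    let w := st.1 ++ [PySem.Int.band code 31]
    let w := if PySem.List.len w > k then w.drop 1 else w
    if p.1 ≥ k - 1 then
      (w, st.2 ++ [w.foldl (fun (v c : Int) => (v <<< (5 : Nat)) + c) 0])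
    else (w, st.2)

lemma pvA_inner_eq (k mask : Int) (seq : String) (st : Int × List Int) :
    pvA_inner k mask seq st = (PySem.List.enumerate seq.toList 0).foldl (pvA_body k mask) st := by
  unfold pvA_inner
  rw [PySem.List.enumerate_eq_map_pyRange seq.toList 'A', List.foldl_map]
  have hlen : PySem.Str.len seq = PySem.List.len seq.toList := by simp [pysem]
  rw [hlen]
  apply PySem.List.foldl_congr_mem
  intro st aa ha
  obtain ⟨h0, h1⟩ := PySem.List.mem_pyRange_one.mp ha
  have h1' : aa < (seq.toList.length : Int) := by
    simpa [PySem.List.len_eq] using h1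
  have hget : PySem.Str.pyGet? seq aa = some (PySem.List.pyGetD seq.toList aa 'A') := by
    have hb : PySem.Str.pyGet? seq aa = PySem.List.pyGet? seq.toList aa := by simp [pysem]
    rw [hb, PySem.List.pyGet?_of_nonneg seq.toList h0,
        PySem.List.pyGetD_eq_getElem seq.toList 'A' h0 h1']
    exact List.getElem?_eq_getElem (by omega)
  rw [hget]
  rfl

lemma pvB_inner_eq (k : Int) (seq : String) (st : List Int × List Int) :
    pvB_inner k seq st = (PySem.List.enumerate seq.toList 0).foldl (pvB_body k) st := by
  rfl

lemma pvStep_rel (k : Int) (hk : 0 ≤ k) (p : Int × Char) (sa : Int × List Int)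
    (sb : List Int × List Int) (h : pvRel k sa sb) :
    pvRel k (pvA_body k (32 ^ k.toNat - 1) sa p) (pvB_body k sb p) := by
  obtain ⟨hout, hx, hcodes, hlen⟩ := h
  cases hd : dicoAA.get? p.2 with
  | none =>
    simp only [pvA_body, pvB_body, hd]
    exact ⟨hout, hx, hcodes, hlen⟩
  | some d =>
    obtain ⟨hd0, hd32⟩ := pvDico_bounds p.2 d hd
    have hn : PySem.Int.band d 31 = d := pvBand31 d hd0 hd32
    have hb1 : ∀ c ∈ sb.1 ++ [d], 0 ≤ c ∧ c < 32 := by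
      intro c hc
      rcases List.mem_append.mp hc with h' | h'
      · exact hcodes c h'
      · simp at h'; subst h'; exact ⟨hd0, hd32⟩
    have hxnn : 0 ≤ sa.1 := by rw [hx]; exact (pvPack_bounds sb.1 hcodes).1
    have hshift : sa.1 <<< (5:Nat) = sa.1 * 32 := by rw [Int.shiftLeft_eq]; norm_num
    -- the new window of B
    set W : List Int := if PySem.List.len (sb.1 ++ [d]) > k then (sb.1 ++ [d]).drop 1
        else sb.1 ++ [d] with hW
    have hdropW : W = (sb.1 ++ [d]).drop ((sb.1 ++ [d]).length - k.toNat) := by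
      rw [hW]
      split_ifs with hc
    -- overlong: length = k.toNat + 1, drop 1
      · simp only [PySem.List.len_eq, List.length_append, List.length_singleton] at hc ⊢
        have : sb.1.length + 1 - k.toNat = 1 := by omega
        rw [this]
      · simp only [PySem.List.len_eq, List.length_append, List.length_singleton] at hc ⊢
        have : sb.1.length + 1 - k.toNat = 0 := by omega
        rw [this, List.drop_zero]
    have hxa : PySem.Int.band ((sa.1 <<< (5:Nat)) + d) (32 ^ k.toNat - 1) = pvPack W := by
      rw [hshift, pvBand_mask _ _ (by nlinarith), hx, ← pvPack_append,
          pvPack_mod_drop _ _ hb1, ← hdropW]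
    have hWb : ∀ c ∈ W, 0 ≤ c ∧ c < 32 := by
      intro c hc
      exact hb1 c (by rw [hdropW] at hc; exact List.mem_of_mem_drop hc)
    have hWlen : W.length ≤ k.toNat := by
      rw [hdropW]
      simp only [List.length_drop, List.length_append, List.length_singleton]
      omega
    have hval : W.foldl (fun (v c : Int) => (v <<< (5 : Nat)) + c) 0 = pvPack W := by
      have hfun : (fun (v c : Int) => (v <<< (5 : Nat)) + c) = (fun (v c : Int) => v * 32 + c) := by
        funext v c; rw [Int.shiftLeft_eq]; norm_num
      rw [hfun]; rfl
    simp only [pvA_body, pvB_body, hd, hn, ← hW]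
    split_ifs with h1 h2
    · refine ⟨?_, hxa, hWb, hWlen⟩
      show sa.2 ++ [PySem.Int.band (sa.1 <<< (5:Nat) + d) (32 ^ k.toNat - 1)]
          = sb.2 ++ [W.foldl (fun (v c : Int) => (v <<< (5 : Nat)) + c) 0]
      rw [hout, hxa, hval]
    · omega
    · omega
    · exact ⟨hout, hxa, hWb, hWlen⟩

lemma pvFold_rel (k : Int) (hk : 0 ≤ k) (ps : List (Int × Char)) (sa : Int × List Int)
    (sb : List Int × List Int) (h : pvRel k sa sb) :
    pvRel k (ps.foldl (pvA_body k (32 ^ k.toNat - 1)) sa) (ps.foldl (pvB_body k) sb) := by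
  induction ps generalizing sa sb with
  | nil => exact h
  | cons p ps ih => exact ih _ _ (pvStep_rel k hk p sa sb h)

-- ===== VERDICT (by name: the statements are the Claim_ definitions above) =====
theorem stream_aa_kmers_spec : Claim_equal_stream_aa_kmers := by
  intro sequences k _ hk
  unfold Spec_stream_aa_kmers stream_aa_kmers stream_aa_kmers_alt
  have hmask : ((1:Int) <<< (k * 5).toNat) - 1 = 32 ^ k.toNat - 1 := by
    rw [Int.shiftLeft_eq]
    have h5 : (k * 5).toNat = 5 * k.toNat := by omega
    rw [h5, pow_mul]
    norm_num
  show (sequences.foldl (fun st seq => pvA_inner k (((1:Int) <<< (k * 5).toNat) - 1) seq st) (0, [])).2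
      = (sequences.foldl (fun st seq => pvB_inner k seq st) ([], [])).2
  rw [hmask]
  have main : ∀ (seqs : List String) (sa : Int × List Int) (sb : List Int × List Int),
      pvRel k sa sb →
      pvRel k (seqs.foldl (fun st seq => pvA_inner k (32 ^ k.toNat - 1) seq st) sa)
        (seqs.foldl (fun st seq => pvB_inner k seq st) sb) := by
    intro seqs
    induction seqs with
    | nil => exact fun _ _ h => h
    | cons s seqs ih =>
      intro sa sb h
      apply ih
      show pvRel k (pvA_inner k (32 ^ k.toNat - 1) s sa) (pvB_inner k s sb)
      rw [pvA_inner_eq, pvB_inner_eq]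
      exact pvFold_rel k hk _ sa sb h
  exact (main sequences (0, []) ([], []) ⟨rfl, by simp [pvPack], by simp, by simp⟩).1
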